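-- pv_equiv track=rewrite | github.com/nathan-builds/python_labs | labs109.py | bulgarian_solitaire
-- ===== SOURCE A (Python) =====
-- def bulgarian_solitaire(piles, k):
--     numbers = [num for num in range(1, k + 1)]
--     count = 0
--     temp_list = []
--     length = 0
--     keep_going = True
--
--     if sorted(piles) == numbers:
--         return 0
--
--     while keep_going:
--         count += 1
--         temp_list = []
--         length = len(piles)
--         for x in piles:
--             if x != 1:
--                 temp_list.append(x - 1)
--
--         temp_list.append(length)
--
--         piles = temp_list
--
--         set_temp_list = set(temp_list)
--         for_counter = 0
--         for num in numbers:
--             for_counter += 1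
--             if num not in set_temp_list:
--                 break
--             elif for_counter == len(numbers):
--                 keep_going = False
--
--     return count
-- ===== SOURCE B (Python) =====
-- from collections import Counter
--
-- def bulgarian_solitaire(piles, k):
--     if sorted(piles) == list(range(1, k + 1)):
--         return 0
--     hist = Counter(piles)
--     total = len(piles)
--     moves = 0
--     while True:
--         moves += 1
--         new_hist = Counter()
--         for size, c in hist.items():
--             if size != 1:
--                 new_hist[size - 1] += c
--         new_total = total - hist[1] + 1
--         new_hist[total] += 1
--         hist, total = new_hist, new_total
--         if all(hist[s] for s in range(1, k + 1)):
--             return moves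
-- ===== Notes on version B (the rewrite author's own statement) =====
-- stated objective: alternative
-- what changed: B replaces A's per-pile list rebuilding and per-move set construction by a Counter histogram of pile sizes built once and updated per move (each distinct size s != 1 shifts its whole count to size s-1, the pile count is tracked arithmetically as total - hist[1] + 1, one new pile of size total is added), with the termination test read off the histogram's counts instead of a freshly built set.
import Mathlib
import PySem

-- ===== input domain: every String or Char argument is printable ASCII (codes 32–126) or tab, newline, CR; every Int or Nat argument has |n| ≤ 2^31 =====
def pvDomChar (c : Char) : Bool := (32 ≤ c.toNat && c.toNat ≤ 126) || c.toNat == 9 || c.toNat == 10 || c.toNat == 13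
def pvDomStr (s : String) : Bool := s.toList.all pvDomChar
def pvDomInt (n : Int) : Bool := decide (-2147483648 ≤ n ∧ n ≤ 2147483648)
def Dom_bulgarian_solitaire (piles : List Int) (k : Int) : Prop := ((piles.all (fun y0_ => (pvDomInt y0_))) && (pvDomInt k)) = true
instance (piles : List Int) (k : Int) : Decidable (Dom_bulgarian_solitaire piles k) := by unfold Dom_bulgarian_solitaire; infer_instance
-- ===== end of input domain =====

-- B replaces A's per-pile list rebuilding and per-move set construction by a histogram
-- (Counter) of pile sizes updated per move (objective: alternative). Both Pythons loop forever
-- on inputs that never reach a state containing {1..k}; the ports make that loop total with one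
-- shared fuel bound (pvFuel, a guard both ports consume identically, never reached on inputs
-- where the Pythons return).

-- ===== PORT A =====
-- the inner 'for num in numbers' with its counter and break, literally
def pvCheckA (numbers : List Int) (s : PySem.Set Int) (for_counter : Nat) (total : Nat)
    (keep_going : Bool) : Bool :=
  match numbers with
  | [] => keep_going
  | num :: rest =>
    let fc := for_counter + 1
    if !(PySem.Set.contains s num) then keep_going
    else if fc = total then pvCheckA rest s fc total false
    else pvCheckA rest s fc total keep_going

-- fuel: a totality guard only; both Pythons diverge past it (they loop forever on such inputs)
def pvFuel (piles : List Int) (k : Int) : Nat :=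
  (piles.foldl (fun a x => a + x.natAbs) 0 + piles.length + k.toNat + 2) ^ 3

def pvLoopA (numbers : List Int) : Nat → List Int → Int → Int
  | 0, _, count => count
  | fuel + 1, piles, count =>
    let count := count + 1
    let length : Int := piles.length
    let temp_list := (piles.foldl (fun acc x => if x ≠ 1 then acc ++ [x - 1] else acc) []) ++ [length]
    let set_temp_list := PySem.Set.ofList temp_list
    let keep_going := pvCheckA numbers set_temp_list 0 numbers.length true
    if keep_going then pvLoopA numbers fuel temp_list count else count

def bulgarian_solitaire (piles : List Int) (k : Int) : Int :=
  let numbers := PySem.List.pyRange 1 (k + 1) 1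
  if PySem.List.sorted piles (fun x => x) false = numbers then 0
  else pvLoopA numbers (pvFuel piles k) piles 0

-- ===== PORT B =====
-- one move on the histogram: every size s ≠ 1 sends its count to s-1, one new pile of size 'total'
def pvStepB (hist : PySem.Dict Int Int) (total : Int) : PySem.Dict Int Int × Int :=
  let new_hist := hist.items.foldl
    (fun nh p => if p.1 ≠ 1 then nh.modify (p.1 - 1) 0 (· + p.2) else nh) PySem.Dict.empty
  let new_total := total - hist.getD 1 0 + 1
  let new_hist := new_hist.modify total 0 (· + 1)
  (new_hist, new_total)

def pvLoopB (k : Int) : Nat → PySem.Dict Int Int → Int → Int → Int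
  | 0, _, _, moves => moves
  | fuel + 1, hist, total, moves =>
    let moves := moves + 1
    let st := pvStepB hist total
    if (PySem.List.pyRange 1 (k + 1) 1).all (fun s => st.1.getD s 0 ≠ 0) then moves
    else pvLoopB k fuel st.1 st.2 moves

def bulgarian_solitaire_alt (piles : List Int) (k : Int) : Int :=
  if PySem.List.sorted piles (fun x => x) false = PySem.List.pyRange 1 (k + 1) 1 then 0
  else pvLoopB k (pvFuel piles k) (PySem.Dict.counter piles) piles.length 0

-- ===== PRECONDITION & SPEC =====
-- Pre_ excludes only k ≤ 0 with a non-empty piles list: there Python A never returns (numbers is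
-- empty, keep_going is never cleared, the while loop runs forever) while B returns after one move.
def Pre_bulgarian_solitaire (piles : List Int) (k : Int) : Prop := 1 ≤ k ∨ piles = []
instance (piles : List Int) (k : Int) : Decidable (Pre_bulgarian_solitaire piles k) := by
  unfold Pre_bulgarian_solitaire; infer_instance
def pvWitness_bulgarian_solitaire : List Int × Int := ([2, 1, 3], 3)

def Spec_bulgarian_solitaire (piles : List Int) (k : Int) (out : Int) : Prop := out = bulgarian_solitaire_alt piles k
instance (piles : List Int) (k : Int) (out : Int) : Decidable (Spec_bulgarian_solitaire piles k out) := by unfold Spec_bulgarian_solitaire; infer_instance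

-- ===== CLAIM (what is proved, stated in full; the proofs are below) =====
def Claim_equal_bulgarian_solitaire : Prop := ∀ (piles : List Int) (k : Int), Dom_bulgarian_solitaire piles k → Pre_bulgarian_solitaire piles k → Spec_bulgarian_solitaire piles k (bulgarian_solitaire piles k)


-- ===== LEMMAS AND PROOFS =====

-- the correspondence between A's pile list and B's histogram state
def pvRep (hist : PySem.Dict Int Int) (piles : List Int) (total : Int) : Prop :=
  hist.keys.Nodup ∧ (∀ v : Int, hist.getD v 0 = (piles.count v : Int)) ∧ total = (piles.length : Int)

-- A's temp_list builder is map-of-filter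
theorem pvTemp_eq (piles : List Int) :
    piles.foldl (fun acc x => if x ≠ 1 then acc ++ [x - 1] else acc) [] =
      (piles.filter (fun x => decide (x ≠ 1))).map (fun x => x - 1) := by
  have h := PySem.List.foldl_append_if (fun x : Int => decide (x ≠ 1)) (fun x : Int => x - 1) piles []
  simpa using h

-- getD after B's rebuilding fold: each entry with key v+1 ≠ 1 contributes its count to v
theorem pvFold_getD (l : List (Int × Int)) (nh : PySem.Dict Int Int) (v : Int) :
    (l.foldl (fun nh p => if p.1 ≠ 1 then nh.modify (p.1 - 1) 0 (· + p.2) else nh) nh).getD v 0 =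
      nh.getD v 0 +
        ((l.filter (fun p => decide (p.1 = v + 1) && decide (p.1 ≠ 1))).map Prod.snd).sum := by
  induction l generalizing nh with
  | nil => simp
  | cons hd tl ih =>
    rw [List.foldl_cons, List.filter_cons]
    by_cases h1 : hd.1 ≠ 1
    · rw [if_pos h1, ih]
      by_cases hv : hd.1 = v + 1
      · have hvv : v = hd.1 - 1 := by omega
        have hf : (decide (hd.1 = v + 1) && decide (hd.1 ≠ 1)) = true := by
          simp [hv]
          omega
        rw [hf]
        simp only [if_pos, List.map_cons, List.sum_cons]
        rw [PySem.Dict.getD_modify, if_pos hvv, hvv]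
        ring
      · have hne : ¬ v = hd.1 - 1 := by omega
        have hf : (decide (hd.1 = v + 1) && decide (hd.1 ≠ 1)) = false := by simp [hv]
        rw [hf]
        simp only [Bool.false_eq_true, if_false]
        rw [PySem.Dict.getD_modify, if_neg hne]
    · rw [if_neg h1, ih]
      have hf : (decide (hd.1 = v + 1) && decide (hd.1 ≠ 1)) = false := by
        simp only [ne_eq, not_not] at h1
        simp [h1]
      rw [hf]
      simp

-- the filtered sum over distinct keys is a single lookup
theorem pvFilterSum (ks : List Int) (g : Int → Int) (v : Int) (hnd : ks.Nodup) :
    (((ks.map (fun s => (s, g s))).filter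
        (fun p => decide (p.1 = v + 1) && decide (p.1 ≠ 1))).map Prod.snd).sum =
      if v + 1 ∈ ks ∧ v + 1 ≠ 1 then g (v + 1) else 0 := by
  induction ks with
  | nil => simp
  | cons hd tl ih =>
    have hnd' := (List.nodup_cons.mp hnd).2
    have hmem := (List.nodup_cons.mp hnd).1
    rw [List.map_cons, List.filter_cons]
    by_cases hv : hd = v + 1
    · by_cases h1 : hd ≠ 1
      · have hf : (decide ((hd, g hd).1 = v + 1) && decide ((hd, g hd).1 ≠ 1)) = true := by
          simp [hv]
          omega
        rw [hf]
        simp only [if_pos, List.map_cons, List.sum_cons]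
        rw [ih hnd']
        have hnotl : ¬ (v + 1 ∈ tl ∧ v + 1 ≠ 1) := by
          intro h; exact hmem (hv ▸ h.1)
        have hyes : v + 1 ∈ hd :: tl ∧ v + 1 ≠ 1 := ⟨by simp [hv], by rw [← hv]; exact h1⟩
        rw [if_neg hnotl, if_pos hyes, ← hv]
        ring
      · simp only [ne_eq, not_not] at h1
        have hf : (decide ((hd, g hd).1 = v + 1) && decide ((hd, g hd).1 ≠ 1)) = false := by
          simp [h1]
        rw [hf]
        simp only [Bool.false_eq_true, if_false]
        rw [ih hnd']
        have h11 : v + 1 = 1 := by omega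
        have hno : ¬ (v + 1 ∈ hd :: tl ∧ v + 1 ≠ 1) := fun h => h.2 h11
        have hnotl : ¬ (v + 1 ∈ tl ∧ v + 1 ≠ 1) := fun h => h.2 h11
        rw [if_neg hnotl, if_neg hno]
    · have hf : (decide ((hd, g hd).1 = v + 1) && decide ((hd, g hd).1 ≠ 1)) = false := by
        simp [hv]
      rw [hf]
      simp only [Bool.false_eq_true, if_false]
      rw [ih hnd']
      by_cases h : v + 1 ∈ tl ∧ v + 1 ≠ 1
      · have hyes : v + 1 ∈ hd :: tl ∧ v + 1 ≠ 1 := ⟨List.mem_cons_of_mem _ h.1, h.2⟩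
        rw [if_pos h, if_pos hyes]
      · have hno : ¬ (v + 1 ∈ hd :: tl ∧ v + 1 ≠ 1) := by
          intro hc
          rcases List.mem_cons.mp hc.1 with he | ht
          · exact hv he.symm
          · exact h ⟨ht, hc.2⟩
        rw [if_neg h, if_neg hno]

-- keys stay duplicate-free through B's rebuilding fold
theorem pvFold_nodup (l : List (Int × Int)) (nh : PySem.Dict Int Int) (h : nh.keys.Nodup) :
    ((l.foldl (fun nh p => if p.1 ≠ 1 then nh.modify (p.1 - 1) 0 (· + p.2) else nh) nh)).keys.Nodup := by
  induction l generalizing nh with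
  | nil => exact h
  | cons hd tl ih =>
    simp only [List.foldl_cons]
    by_cases h1 : hd.1 ≠ 1
    · rw [if_pos h1]
      apply ih
      rw [PySem.Dict.keys_modify]
      exact PySem.Dict.nodup_keys_insert _ _ _ h
    · rw [if_neg h1]; exact ih _ h

theorem pvModify_nodup (d : PySem.Dict Int Int) (k : Int) (f : Int → Int) (h : d.keys.Nodup) :
    (d.modify k 0 f).keys.Nodup := by
  rw [PySem.Dict.keys_modify]
  exact PySem.Dict.nodup_keys_insert _ _ _ h

-- filtering out the 1-piles removes exactly count 1 elements
theorem pvLenFilter (l : List Int) :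
    (l.filter (fun x => decide (x ≠ 1))).length + l.count 1 = l.length := by
  induction l with
  | nil => simp
  | cons hd tl ih =>
    rw [List.filter_cons, List.count_cons, List.length_cons]
    by_cases h : hd = 1
    · subst h
      have e1 : (decide ((1 : Int) ≠ 1)) = false := by decide
      have e2 : (((1 : Int) == 1)) = true := by decide
      rw [e1, e2]
      simp only [Bool.false_eq_true, if_false, if_true]
      omega
    · have e1 : (decide (hd ≠ 1)) = true := by simp [h]
      have e2 : ((hd == 1)) = false := by simp [h]
      rw [e1, e2]
      simp only [if_true, Bool.false_eq_true, if_false, List.length_cons]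
      omega

-- one B move tracks one A move: the new histogram counts A's new pile list
theorem pvStep_rep (hist : PySem.Dict Int Int) (piles : List Int) (total : Int)
    (hrep : pvRep hist piles total) :
    pvRep (pvStepB hist total).1
      ((piles.foldl (fun acc x => if x ≠ 1 then acc ++ [x - 1] else acc) []) ++ [(piles.length : Int)])
      (pvStepB hist total).2 := by
  obtain ⟨hnd, hcnt, htot⟩ := hrep
  rw [pvTemp_eq]
  have hsub_inj : Function.Injective (fun x : Int => x - 1) := fun a b h => by
    simpa using h
  -- the rebuilt histogram before the final bump
  have hbase : ∀ v : Int,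
      ((hist.items.foldl
        (fun nh p => if p.1 ≠ 1 then nh.modify (p.1 - 1) 0 (· + p.2) else nh)
        PySem.Dict.empty)).getD v 0 =
      (((piles.filter (fun x => decide (x ≠ 1))).map (fun x => x - 1)).count v : Int) := by
    intro v
    rw [pvFold_getD, PySem.Dict.getD_empty, PySem.Dict.items_eq_map_keys hist hnd 0,
      pvFilterSum hist.keys (fun s => hist.getD s 0) v hnd, zero_add]
    have hv1 : v + 1 - 1 = v := by omega
    have h0 := List.count_map_of_injective (piles.filter (fun x => decide (x ≠ 1)))
      (fun x : Int => x - 1) hsub_inj (v + 1)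
    rw [hv1] at h0
    rw [h0]
    by_cases h1 : v + 1 ≠ 1
    · have hcf : (piles.filter (fun x => decide (x ≠ 1))).count (v + 1) = piles.count (v + 1) :=
        List.count_filter (by simpa using h1)
      by_cases hm : v + 1 ∈ hist.keys
      · rw [if_pos ⟨hm, h1⟩, hcnt, hcf]
      · rw [if_neg (fun h => hm h.1), hcf]
        have hz : hist.getD (v + 1) 0 = 0 := by
          apply PySem.Dict.getD_of_not_contains
          rw [← Bool.not_eq_true, PySem.Dict.contains_iff_mem_keys]
          exact hm
        rw [hcnt] at hz
        omega
    · have h11 : v + 1 = 1 := by omega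
      have hcf : (piles.filter (fun x => decide (x ≠ 1))).count (v + 1) = 0 := by
        apply List.count_eq_zero.mpr
        simp [h11]
      rw [if_neg (fun h => h.2 h11), hcf]
      simp
  refine ⟨?_, ?_, ?_⟩
  · -- keys stay duplicate-free
    exact pvModify_nodup _ _ _ (pvFold_nodup _ _ PySem.Dict.nodup_keys_empty)
  · -- every lookup is the multiset count of A's new pile list
    intro v
    show ((hist.items.foldl
        (fun nh p => if p.1 ≠ 1 then nh.modify (p.1 - 1) 0 (· + p.2) else nh)
        PySem.Dict.empty).modify total 0 (· + 1)).getD v 0 = _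
    rw [PySem.Dict.getD_modify, List.count_append]
    by_cases hv : v = total
    · subst hv
      rw [if_pos rfl, hbase]
      have h1 : (List.count v [(piles.length : Int)]) = 1 := by
        rw [List.count_cons]
        simp [htot]
      rw [h1]
      push_cast
      omega
    · rw [if_neg hv, hbase]
      have h1 : (List.count v [(piles.length : Int)]) = 0 := by
        rw [List.count_cons]
        have hne : ¬ ((piles.length : Int) = v) := by rw [← htot]; exact fun h => hv h.symm
        simp [hne]
      rw [h1]
      simp
  · -- the pile count drops by the number of 1-piles and gains the new pile
    show total - hist.getD 1 0 + 1 = _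
    rw [hcnt 1, htot]
    have := pvLenFilter piles
    simp only [List.length_append, List.length_map, List.length_cons, List.length_nil]
    push_cast
    omega

-- A's inner check loop computes "not every number is present"
theorem pvCheckA_eq (rest : List Int) : ∀ (num : Int) (s : PySem.Set Int) (fc : Nat),
    pvCheckA (num :: rest) s fc (fc + (rest.length + 1)) true =
      !((num :: rest).all (fun n => s.contains n)) := by
  induction rest with
  | nil =>
    intro num s fc
    simp [pvCheckA]
  | cons r rs ih =>
    intro num s fc
    simp only [List.length_cons]
    have hne : ¬ (fc + 1 = fc + (rs.length + 1 + 1)) := by omega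
    by_cases hc : s.contains num
    · have h1 : pvCheckA (num :: r :: rs) s fc (fc + (rs.length + 1 + 1)) true
          = pvCheckA (r :: rs) s (fc + 1) (fc + (rs.length + 1 + 1)) true := by
        conv_lhs => unfold pvCheckA
        rw [hc]
        simp only [Bool.not_true, Bool.false_eq_true, if_false, if_neg hne]
      have h2 : fc + (rs.length + 1 + 1) = (fc + 1) + (rs.length + 1) := by omega
      rw [h1, h2, ih r s (fc + 1)]
      conv_rhs => rw [List.all_cons]
      rw [hc, Bool.true_and]
    · have h1 : pvCheckA (num :: r :: rs) s fc (fc + (rs.length + 1 + 1)) true = true := by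
        conv_lhs => unfold pvCheckA
        rw [Bool.not_eq_true] at hc
        rw [hc]
        simp
      rw [h1, List.all_cons]
      rw [Bool.not_eq_true] at hc
      rw [hc, Bool.false_and, Bool.not_false]

-- the check on the range 1..k, as A runs it from counter 0
theorem pvCheckA_range (k : Int) (hk : 1 ≤ k) (s : PySem.Set Int) :
    pvCheckA (PySem.List.pyRange 1 (k + 1)) s 0 (PySem.List.pyRange 1 (k + 1)).length true =
      !((PySem.List.pyRange 1 (k + 1)).all (fun n => s.contains n)) := by
  rw [PySem.List.pyRange_one_cons (by omega : (1 : Int) < k + 1)]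
  have hlen : ((1 : Int) :: PySem.List.pyRange (1 + 1) (k + 1)).length
      = 0 + ((PySem.List.pyRange (1 + 1) (k + 1)).length + 1) := by simp
  rw [hlen]
  exact pvCheckA_eq _ _ _ _

-- values of the rebuilt histogram decide membership in A's new pile list
theorem pvCheck_agree (hist : PySem.Dict Int Int) (temp : List Int)
    (h : ∀ v : Int, hist.getD v 0 = (temp.count v : Int)) (l : List Int) :
    (l.all (fun s => decide (hist.getD s 0 ≠ 0))) =
      (l.all (fun n => PySem.Set.contains (PySem.Set.ofList temp) n)) := by
  rw [Bool.eq_iff_iff]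
  simp only [List.all_eq_true, decide_eq_true_eq]
  constructor
  · intro hh x hx
    rw [PySem.Set.contains_iff, PySem.Set.mem_ofList]
    have := hh x hx
    rw [h x] at this
    have hcp : 0 < temp.count x := by omega
    exact List.count_pos_iff.mp hcp
  · intro hh x hx
    have := hh x hx
    rw [PySem.Set.contains_iff, PySem.Set.mem_ofList] at this
    rw [h x]
    have := List.count_pos_iff.mpr this
    omega

-- the two loops agree step for step on a shared fuel
theorem pvLoop_eq (k : Int) (hk : 1 ≤ k) (fuel : Nat) :
    ∀ (piles : List Int) (hist : PySem.Dict Int Int) (total count : Int),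
    pvRep hist piles total →
    pvLoopA (PySem.List.pyRange 1 (k + 1)) fuel piles count = pvLoopB k fuel hist total count := by
  induction fuel with
  | zero => intro piles hist total count _; rfl
  | succ n ih =>
    intro piles hist total count hrep
    have hstep := pvStep_rep hist piles total hrep
    simp only [pvLoopA, pvLoopB]
    rw [pvCheckA_range k hk, pvCheck_agree (pvStepB hist total).1 _ (fun v => hstep.2.1 v)]
    cases hall : ((PySem.List.pyRange 1 (k + 1)).all
        (fun n => PySem.Set.contains (PySem.Set.ofList
          ((piles.foldl (fun acc x => if x ≠ 1 then acc ++ [x - 1] else acc) []) ++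
            [(piles.length : Int)])) n)) with
    | true => simp
    | false =>
      simp only [Bool.not_false, if_true, Bool.false_eq_true, if_false]
      exact ih _ _ _ _ hstep

-- ===== VERDICT (by name: the statement is the Claim_ definition above) =====
theorem bulgarian_solitaire_spec : Claim_equal_bulgarian_solitaire := by
  intro piles k hdom hpre
  unfold Spec_bulgarian_solitaire bulgarian_solitaire bulgarian_solitaire_alt
  by_cases hs : PySem.List.sorted piles (fun x => x) false = PySem.List.pyRange 1 (k + 1)
  · simp [hs]
  · have hk : 1 ≤ k := by
      by_contra hnk
      rcases hpre with hk1 | hnil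
      · exact hnk hk1
      · apply hs
        subst hnil
        rw [(PySem.List.sorted_eq_nil_iff _ _ _).mpr rfl,
          PySem.List.pyRange_one_eq_nil (by omega : k + 1 ≤ 1)]
    simp only [hs, if_neg, not_false_eq_true]
    exact pvLoop_eq k hk (pvFuel piles k) piles (PySem.Dict.counter piles) piles.length 0
      ⟨PySem.Dict.nodup_keys_counter piles,
       fun v => PySem.Dict.getD_counter piles v, rfl⟩
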